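-- pv_equiv track=rewrite | github.com/daviolimen/Exercises | Questões/escolha_seu_caminho.py | bfs
-- ===== SOURCE A (Python) =====
-- from collections import deque
--
-- def bfs(graph):
--     visited, queue = set(), deque([(1, 1)])
--     custo_finais = []
--     while queue:
--         cost, u = queue.popleft()
--         if u in visited:
--             continue
--         visited.add(u)
--         if len(graph[u]) == 0:
--             custo_finais.append(cost)
--         for v in graph[u]:
--             if v in visited:
--                 continue
--             queue.append((cost + 1, v))
--     return (visited, min(custo_finais))
-- ===== SOURCE B (Python) =====
-- def bfs(graph):
--     # Bellman-Ford-style relaxation: len(graph) rounds over a distance dict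
--     # (no queue, no frontier); dict insertion order doubles as visit order.
--     dist = {1: 1}
--     for _ in range(len(graph)):
--         for u in list(dist):
--             du = dist[u]
--             for v in graph[u]:
--                 if v not in dist or du + 1 < dist[v]:
--                     dist[v] = du + 1
--     return (set(dist), min(d for u, d in dist.items() if len(graph[u]) == 0))
-- ===== Notes on version B (the rewrite author's own statement) =====
-- stated objective: alternative
-- what changed: Replaces A's BFS traversal (deque of (cost,node) pairs, visited set, list of leaf costs) by Bellman-Ford-style relaxation: len(graph) rounds that relax every edge out of the current distance dict, then one min over the leaves' distances; there is no queue or frontier at all.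
import Mathlib
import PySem

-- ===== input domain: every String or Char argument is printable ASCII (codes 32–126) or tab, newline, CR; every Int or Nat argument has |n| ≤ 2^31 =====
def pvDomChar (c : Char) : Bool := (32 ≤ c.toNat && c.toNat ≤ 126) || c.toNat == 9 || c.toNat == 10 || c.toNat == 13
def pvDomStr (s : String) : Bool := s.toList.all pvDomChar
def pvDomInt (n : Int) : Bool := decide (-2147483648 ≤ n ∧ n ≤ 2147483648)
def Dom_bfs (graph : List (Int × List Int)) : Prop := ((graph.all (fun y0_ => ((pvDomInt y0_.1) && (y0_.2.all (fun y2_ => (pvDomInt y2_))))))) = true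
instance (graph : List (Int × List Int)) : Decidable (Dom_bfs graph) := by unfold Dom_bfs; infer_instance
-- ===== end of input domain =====

-- B replaces A's BFS (deque of (cost,node) pairs + visited set) by Bellman-Ford-style
-- relaxation rounds over a distance dict and a final min over the leaves' distances
-- (objective: alternative; same values, and the dict's key insertion order matches
-- A's visited insertion order).

-- number of keys of the graph not yet visited: the termination measure of A's loop
def pvUnvis (graph : List (Int × List Int)) (V : PySem.Set Int) : Nat :=
  ((PySem.Dict.mk graph).keys.toFinset.filter (fun k => k ∉ V)).card

theorem pvUnvis_add_lt (graph : List (Int × List Int)) (V : PySem.Set Int) (u : Int)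
    (hk : u ∈ (PySem.Dict.mk graph).keys) (hv : u ∉ V) :
    pvUnvis graph (PySem.Set.add V u) < pvUnvis graph V := by
  apply Finset.card_lt_card
  constructor
  · intro x hx
    simp only [Finset.mem_filter] at hx ⊢
    refine ⟨hx.1, fun hm => hx.2 ?_⟩
    rw [PySem.Set.add_eq_ite]
    split <;> simp [hm]
  · intro hsub
    have := hsub (Finset.mem_filter.mpr ⟨List.mem_toFinset.mpr hk, hv⟩)
    simp only [Finset.mem_filter] at this
    exact this.2 (by simp [PySem.Set.add_of_not_mem hv])

theorem get?_mem_keys {graph : List (Int × List Int)} {u : Int} {adj : List Int}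
    (h : (PySem.Dict.mk graph).get? u = some adj) : u ∈ (PySem.Dict.mk graph).keys := by
  by_contra hn
  rw [← PySem.Dict.get?_eq_none_iff_not_mem_keys] at hn
  simp [hn] at h

-- ===== PORT A =====
-- A's while loop over the deque of (cost, node) pairs; on KeyError (graph[u] missing,
-- excluded by Pre_bfs) and on min([]) (ValueError, excluded by Pre_bfs) it returns a junk value.
def bfsLoop (graph : List (Int × List Int)) (V : PySem.Set Int) (queue : List (Int × Int))
    (custo : List Int) : List Int × Int :=
  match queue with
  | [] =>
    match PySem.List.min? custo (fun x => x) with   -- min(custo_finais)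
    | some m => (V, m)
    | none => (V, 0)                                -- Python raises ValueError here (∉ Pre_bfs)
  | (cost, u) :: rest =>
    if PySem.Set.contains V u then bfsLoop graph V rest custo
    else
      match h : (PySem.Dict.mk graph).get? u with   -- graph[u]
      | none => (PySem.Set.add V u, 0)              -- Python raises KeyError here (∉ Pre_bfs)
      | some adj =>
        bfsLoop graph (PySem.Set.add V u)
          (rest ++ (adj.filter (fun v => !PySem.Set.contains (PySem.Set.add V u) v)).map
            (fun v => (cost + 1, v)))
          (if adj.length = 0 then custo ++ [cost] else custo)
  termination_by (pvUnvis graph V, queue.length)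
  decreasing_by
  · exact Prod.Lex.right _ (by simp)
  · exact Prod.Lex.left _ _
      (pvUnvis_add_lt graph V u (get?_mem_keys h)
        (fun hm => ‹¬V.contains u = true› ((PySem.Set.contains_iff V u).mpr hm)))

def bfs (graph : List (Int × List Int)) : List Int × Int :=
  bfsLoop graph PySem.Set.empty [(1, 1)] []

-- ===== PORT B =====
-- B's inner relaxation `for v in graph[u]` loop over one adjacency list
def relaxAdj (d : PySem.Dict Int Int) (du : Int) (adj : List Int) : PySem.Dict Int Int :=
  adj.foldl (fun d v =>
    if !d.contains v || decide (du + 1 < d.getD v 0) then d.insert v (du + 1) else d) d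

-- B's `for u in list(dist)` loop over a snapshot of the keys; dist[u] is read with getD:
-- keys are never removed, so the u-lookup itself cannot raise; graph[u] can (KeyError,
-- handled as none, ∉ Pre_bfs)
def relaxKeys (graph : List (Int × List Int)) :
    List Int → PySem.Dict Int Int → Option (PySem.Dict Int Int)
  | [], d => some d
  | u :: rest, d =>
    match (PySem.Dict.mk graph).get? u with        -- graph[u]
    | none => none                                 -- KeyError (∉ Pre_bfs)
    | some adj => relaxKeys graph rest (relaxAdj d (d.getD u 0) adj)

-- B's `for _ in range(len(graph))` outer loop (counted rounds)
def relaxRounds (graph : List (Int × List Int)) :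
    Nat → PySem.Dict Int Int → Option (PySem.Dict Int Int)
  | 0, d => some d
  | n + 1, d =>
    match relaxKeys graph d.keys d with
    | none => none
    | some d' => relaxRounds graph n d'

-- the generator `(d for u, d in dist.items() if len(graph[u]) == 0)`
def leafCosts (graph : List (Int × List Int)) : List (Int × Int) → Option (List Int)
  | [] => some []
  | (u, du) :: rest =>
    match (PySem.Dict.mk graph).get? u with        -- graph[u]
    | none => none                                 -- KeyError (∉ Pre_bfs)
    | some adj =>
      match leafCosts graph rest with
      | none => none
      | some cs => some (if adj.length = 0 then du :: cs else cs)

-- `return (set(dist), min(...))` on the final dict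
def postRelax (graph : List (Int × List Int)) (d : PySem.Dict Int Int) : List Int × Int :=
  match leafCosts graph d.items with
  | none => (d.keys, 0)                            -- KeyError inside min (∉ Pre_bfs)
  | some cs =>
    match PySem.List.min? cs (fun x => x) with
    | some m => (d.keys, m)
    | none => (d.keys, 0)                          -- min() of empty: ValueError (∉ Pre_bfs)

def bfs_alt (graph : List (Int × List Int)) : List Int × Int :=
  match relaxRounds graph graph.length (PySem.Dict.mk [(1, 1)]) with
  | none => ([], 0)                                -- KeyError in a round (∉ Pre_bfs)
  | some d => postRelax graph d

-- ===== PRECONDITION & SPEC =====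
-- everything the start node 1 can reach in the graph (bounded closure; reachability is the
-- one inherently inductive ingredient of "A returns without raising", it copies neither port)
def pvAdj (graph : List (Int × List Int)) (u : Int) : List Int := (PySem.Dict.mk graph).getD u []

def pvReach (graph : List (Int × List Int)) : Nat → List Int
  | 0 => [1]
  | n + 1 =>
    PySem.List.dedup (pvReach graph n ++ (pvReach graph n).flatMap (pvAdj graph))

-- exactly the inputs on which A returns: every node reachable from 1 is a key of the dict
-- (else graph[u] raises KeyError) and some reachable node is a leaf (else min([]) raises ValueError)
def Pre_bfs (graph : List (Int × List Int)) : Prop :=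
  (∀ u ∈ pvReach graph (graph.length + 1), (PySem.Dict.mk graph).contains u = true) ∧
  (∃ u ∈ pvReach graph (graph.length + 1), (PySem.Dict.mk graph).get? u = some [])
instance (graph : List (Int × List Int)) : Decidable (Pre_bfs graph) := by
  unfold Pre_bfs; infer_instance

def pvWitness_bfs : (List (Int × List Int)) := [(1, [2]), (2, [])]

def Spec_bfs (graph : List (Int × List Int)) (out : List Int × Int) : Prop := out = bfs_alt graph
instance (graph : List (Int × List Int)) (out : List Int × Int) : Decidable (Spec_bfs graph out) := by
  unfold Spec_bfs; infer_instance

-- ===== CLAIM (what is proved, stated in full; the proofs are below) =====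
def Claim_equal_bfs : Prop := ∀ (graph : List (Int × List Int)), Dom_bfs graph → Pre_bfs graph → Spec_bfs graph (bfs graph)


-- ===== LEMMAS AND PROOFS =====

theorem pvUnvis_add_le (graph : List (Int × List Int)) (V : PySem.Set Int) (u : Int) :
    pvUnvis graph (PySem.Set.add V u) ≤ pvUnvis graph V := by
  apply Finset.card_le_card
  intro x hx
  simp only [Finset.mem_filter] at hx ⊢
  refine ⟨hx.1, fun hm => hx.2 ?_⟩
  rw [PySem.Set.add_eq_ite]
  split <;> simp [hm]


-- first occurrences of a list's elements that are not in V (the order in which a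
-- relaxation round inserts new keys, and in which a BFS level visits new nodes)
def pvFresh (V : List Int) : List Int → List Int
  | [] => []
  | u :: fr => if u ∈ V then pvFresh V fr else u :: pvFresh (V ++ [u]) fr

theorem mem_pvFresh {x : Int} : ∀ {fr V : List Int}, x ∈ pvFresh V fr ↔ x ∈ fr ∧ x ∉ V := by
  intro fr
  induction fr with
  | nil => intro V; simp [pvFresh]
  | cons u fr ih =>
    intro V
    by_cases hu : u ∈ V
    · simp only [pvFresh, if_pos hu, ih, List.mem_cons]
      constructor
      · rintro ⟨h1, h2⟩; exact ⟨Or.inr h1, h2⟩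
      · rintro ⟨h1 | h1, h2⟩
        · exact absurd (h1 ▸ hu) h2
        · exact ⟨h1, h2⟩
    · simp only [pvFresh, if_neg hu, List.mem_cons, ih, List.mem_append,
        List.mem_singleton]
      constructor
      · rintro (rfl | ⟨h1, h2⟩)
        · exact ⟨Or.inl rfl, hu⟩
        · exact ⟨Or.inr h1, fun hv => h2 (Or.inl hv)⟩
      · rintro ⟨rfl | h1, h2⟩
        · exact Or.inl rfl
        · by_cases hxu : x = u
          · exact Or.inl hxu
          · exact Or.inr ⟨h1, by rintro (h | h); exact h2 h; exact hxu (by simpa using h)⟩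

theorem pvFresh_nodup : ∀ (fr V : List Int), (pvFresh V fr).Nodup := by
  intro fr
  induction fr with
  | nil => intro V; simp [pvFresh]
  | cons u fr ih =>
    intro V
    by_cases hu : u ∈ V
    · simpa [pvFresh, hu] using ih V
    · simp only [pvFresh, if_neg hu, List.nodup_cons]
      refine ⟨fun hm => ?_, ih _⟩
      exact (mem_pvFresh.mp hm).2 (by simp)

theorem pvFresh_append : ∀ (xs : List Int) (V ys : List Int),
    pvFresh V (xs ++ ys) = pvFresh V xs ++ pvFresh (V ++ pvFresh V xs) ys := by
  intro xs
  induction xs with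
  | nil => intro V ys; simp [pvFresh]
  | cons u xs ih =>
    intro V ys
    by_cases hu : u ∈ V
    · simp only [List.cons_append, pvFresh, if_pos hu]
      exact ih V ys
    · simp only [List.cons_append, pvFresh, if_neg hu, ih (V ++ [u]) ys]
      simp [List.append_assoc]

theorem pvFresh_filter (W : PySem.Set Int) :
    ∀ (l Vbig : List Int), (∀ x ∈ W, x ∈ Vbig) →
    pvFresh Vbig (l.filter (fun v => !PySem.Set.contains W v)) = pvFresh Vbig l := by
  intro l
  induction l with
  | nil => intro Vbig _; simp
  | cons v l ih =>
    intro Vbig hWV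
    by_cases hW : v ∈ W
    · have hc : PySem.Set.contains W v = true := (PySem.Set.contains_iff W v).mpr hW
      have hv : v ∈ Vbig := hWV v hW
      have hfilt : (v :: l).filter (fun v => !PySem.Set.contains W v) =
          l.filter (fun v => !PySem.Set.contains W v) := by simp [List.filter_cons, hW]
      rw [hfilt, ih Vbig hWV]
      simp [pvFresh, hv]
    · have hc : PySem.Set.contains W v = false := by
        by_contra h
        exact hW ((PySem.Set.contains_iff W v).mp (by revert h; cases PySem.Set.contains W v <;> simp))
      have hfilt : (v :: l).filter (fun v => !PySem.Set.contains W v) =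
          v :: l.filter (fun v => !PySem.Set.contains W v) := by simp [List.filter_cons, hW]
      rw [hfilt]
      by_cases hv : v ∈ Vbig
      · simp only [pvFresh, if_pos hv]
        exact ih Vbig hWV
      · simp only [pvFresh, if_neg hv]
        rw [ih (Vbig ++ [v]) (fun x hx => List.mem_append_left _ (hWV x hx))]

-- reachability closure: pvReach saturates by fuel len+1
theorem pvReach_mono {graph : List (Int × List Int)} {x : Int} {n : Nat}
    (h : x ∈ pvReach graph n) : x ∈ pvReach graph (n + 1) := by
  simp only [pvReach, PySem.List.mem_dedup, List.mem_append]
  exact Or.inl h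

theorem mem_pvReach_succ {graph : List (Int × List Int)} {x : Int} {n : Nat} :
    x ∈ pvReach graph (n + 1) ↔
      x ∈ pvReach graph n ∨ ∃ u ∈ pvReach graph n, x ∈ pvAdj graph u := by
  simp only [pvReach, PySem.List.mem_dedup, List.mem_append, List.mem_flatMap]

theorem one_mem_pvReach (graph : List (Int × List Int)) : ∀ n, (1 : Int) ∈ pvReach graph n := by
  intro n
  induction n with
  | zero => simp [pvReach]
  | succ n ih => exact pvReach_mono ih

theorem contains_of_pvAdj_ne_nil {graph : List (Int × List Int)} {u : Int}
    (h : pvAdj graph u ≠ []) : (PySem.Dict.mk graph).contains u = true := by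
  rw [PySem.Dict.contains_eq_isSome_get?]
  cases hg : (PySem.Dict.mk graph).get? u with
  | none => exact absurd (by simp [pvAdj, PySem.Dict.getD_eq_get?_getD, hg]) h
  | some a => simp

def pvKf (graph : List (Int × List Int)) (n : Nat) : Finset Int :=
  (pvReach graph n).toFinset.filter (fun u => (PySem.Dict.mk graph).contains u = true)

theorem pvKf_mono (graph : List (Int × List Int)) (n : Nat) :
    pvKf graph n ⊆ pvKf graph (n + 1) := by
  intro x hx
  simp only [pvKf, Finset.mem_filter, List.mem_toFinset] at hx ⊢
  exact ⟨pvReach_mono hx.1, hx.2⟩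

theorem pvKf_card_le (graph : List (Int × List Int)) (n : Nat) :
    (pvKf graph n).card ≤ graph.length := by
  have hsub : pvKf graph n ⊆ (PySem.Dict.mk graph).keys.toFinset := by
    intro x hx
    simp only [pvKf, Finset.mem_filter, List.mem_toFinset] at hx
    rw [List.mem_toFinset, ← PySem.Dict.contains_iff_mem_keys]
    exact hx.2
  calc (pvKf graph n).card ≤ (PySem.Dict.mk graph).keys.toFinset.card := Finset.card_le_card hsub
    _ ≤ (PySem.Dict.mk graph).keys.length := (PySem.Dict.mk graph).keys.toFinset_card_le
    _ = graph.length := by simp [PySem.Dict.keys_mk, PySem.Dict.mk]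

theorem pvReach_step_down {graph : List (Int × List Int)} {n : Nat}
    (hK : pvKf graph (n + 1) ⊆ pvKf graph n) :
    ∀ x ∈ pvReach graph (n + 2), x ∈ pvReach graph (n + 1) := by
  intro x hx
  rcases mem_pvReach_succ.mp hx with h | ⟨u, hu, hadj⟩
  · exact h
  · have hc : (PySem.Dict.mk graph).contains u = true :=
      contains_of_pvAdj_ne_nil (by intro h0; rw [h0] at hadj; simp at hadj)
    have huK : u ∈ pvKf graph (n + 1) := by
      simp only [pvKf, Finset.mem_filter, List.mem_toFinset]; exact ⟨hu, hc⟩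
    have huK' := hK huK
    simp only [pvKf, Finset.mem_filter, List.mem_toFinset] at huK'
    exact mem_pvReach_succ.mpr (Or.inr ⟨u, huK'.1, hadj⟩)

theorem pvReach_stab {graph : List (Int × List Int)} {n : Nat}
    (hK : pvKf graph (n + 1) ⊆ pvKf graph n) :
    ∀ j, ∀ x ∈ pvReach graph (n + 1 + j + 1), x ∈ pvReach graph (n + 1 + j) := by
  intro j
  induction j with
  | zero => exact pvReach_step_down hK
  | succ j ih =>
    have hK' : pvKf graph (n + 1 + j + 1) ⊆ pvKf graph (n + 1 + j) := by
      intro x hx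
      simp only [pvKf, Finset.mem_filter, List.mem_toFinset] at hx ⊢
      exact ⟨ih x hx.1, hx.2⟩
    intro x hx
    exact pvReach_step_down (n := n + 1 + j) hK' x hx

theorem pvReach_closed (graph : List (Int × List Int)) :
    ∀ u ∈ pvReach graph (graph.length + 1), ∀ v ∈ pvAdj graph u,
      v ∈ pvReach graph (graph.length + 1) := by
  intro u hu v hv
  have hstep : ∃ n ≤ graph.length, pvKf graph (n + 1) ⊆ pvKf graph n := by
    by_contra hcon
    push_neg at hcon
    have hstrict : ∀ n ≤ graph.length, (pvKf graph n).card + 1 ≤ (pvKf graph (n + 1)).card := by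
      intro n hn
      have hss : pvKf graph n ⊂ pvKf graph (n + 1) :=
        Finset.ssubset_iff_subset_ne.mpr ⟨pvKf_mono graph n,
          fun h => (hcon n hn) (le_of_eq h.symm)⟩
      exact Finset.card_lt_card hss
    have hcard : ∀ n, n ≤ graph.length + 1 → n ≤ (pvKf graph n).card := by
      intro n
      induction n with
      | zero => intro _; exact Nat.zero_le _
      | succ n ih =>
        intro hn
        have h1 := ih (by omega)
        have h2 := hstrict n (by omega)
        omega
    have := hcard (graph.length + 1) le_rfl
    have := pvKf_card_le graph (graph.length + 1)
    omega
  obtain ⟨n, hn, hK⟩ := hstep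
  have hv2 : v ∈ pvReach graph (graph.length + 2) :=
    mem_pvReach_succ.mpr (Or.inr ⟨u, hu, hv⟩)
  have := pvReach_stab hK (graph.length - n) v
  have heq1 : n + 1 + (graph.length - n) + 1 = graph.length + 2 := by omega
  have heq2 : n + 1 + (graph.length - n) = graph.length + 1 := by omega
  rw [heq1, heq2] at this
  exact this hv2


-- intermediate level-synchronous view of A's loop (proof helper only): one BFS level
def lvStep (graph : List (Int × List Int)) (V : PySem.Set Int) (frontier next custo : List Int)
    (depth : Int) : (List Int × Int) ⊕ (PySem.Set Int × List Int × List Int) :=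
  match frontier with
  | [] => .inr (V, next, custo)
  | u :: rest =>
    if PySem.Set.contains V u then lvStep graph V rest next custo depth
    else
      match (PySem.Dict.mk graph).get? u with
      | none => .inl (PySem.Set.add V u, 0)
      | some adj =>
        if adj.length = 0 then
          lvStep graph (PySem.Set.add V u) rest next (custo ++ [depth]) depth
        else
          lvStep graph (PySem.Set.add V u) rest
            (next ++ adj.filter (fun v => !PySem.Set.contains (PySem.Set.add V u) v)) custo depth

theorem lvStep_le (graph : List (Int × List Int)) (frontier : List Int) :
    ∀ V next custo depth V' next' custo',
      lvStep graph V frontier next custo depth = .inr (V', next', custo') →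
      pvUnvis graph V' ≤ pvUnvis graph V := by
  induction frontier with
  | nil => intro V next custo depth V' next' custo' h; simp [lvStep] at h; simp [h.1]
  | cons u rest ih =>
    intro V next custo depth V' next' custo' h
    simp only [lvStep] at h
    split at h
    · exact ih _ _ _ _ _ _ _ h
    · split at h
      · exact absurd h (by simp)
      · split at h <;>
          exact le_trans (ih _ _ _ _ _ _ _ h) (pvUnvis_add_le graph V u)

theorem lvStep_progress (graph : List (Int × List Int)) (frontier : List Int) :
    ∀ V next custo depth V' next' custo',
      lvStep graph V frontier next custo depth = .inr (V', next', custo') →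
      (V' = V ∧ next' = next ∧ custo' = custo) ∨ pvUnvis graph V' < pvUnvis graph V := by
  induction frontier with
  | nil =>
    intro V next custo depth V' next' custo' h
    simp [lvStep] at h
    exact Or.inl ⟨h.1.symm, h.2.1.symm, h.2.2.symm⟩
  | cons u rest ih =>
    intro V next custo depth V' next' custo' h
    simp only [lvStep] at h
    split at h
    · exact ih _ _ _ _ _ _ _ h
    · rename_i hc
      have hu : u ∉ V := fun hm => hc ((PySem.Set.contains_iff V u).mpr hm)
      split at h
      · exact absurd h (by simp)
      · rename_i adj hadj
        have hlt : pvUnvis graph (PySem.Set.add V u) < pvUnvis graph V :=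
          pvUnvis_add_lt graph V u (get?_mem_keys hadj) hu
        split at h <;>
          exact Or.inr (lt_of_le_of_lt (lvStep_le graph rest _ _ _ _ _ _ _ h) hlt)

-- the outer level loop, one recursive call per depth level
def lvLoop (graph : List (Int × List Int)) (V : PySem.Set Int) (frontier custo : List Int)
    (depth : Int) : List Int × Int :=
  match hf : frontier with
  | [] =>
    match PySem.List.min? custo (fun x => x) with
    | some m => (V, m)
    | none => (V, 0)
  | _ :: _ =>
    match hs : lvStep graph V frontier [] custo depth with
    | .inl ans => ans
    | .inr (V', next, custo') => lvLoop graph V' next custo' (depth + 1)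
  termination_by (pvUnvis graph V, frontier.length)
  decreasing_by
    rcases lvStep_progress graph frontier V [] custo depth V' next custo' (hf ▸ hs) with
      ⟨hV, hn, _⟩ | hlt
    · subst hV hn
      exact Prod.Lex.right _ (by simp)
    · exact Prod.Lex.left _ _ hlt

-- one level of lvStep mirrors a stretch of A's deque loop
theorem level_eq (graph : List (Int × List Int)) (c : Int) (frontier : List Int) :
    ∀ V next custo,
      (∀ ans, lvStep graph V frontier next custo c = .inl ans →
        bfsLoop graph V (frontier.map (fun u => (c, u)) ++ next.map (fun v => (c + 1, v))) custo
          = ans) ∧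
      (∀ V' next' custo', lvStep graph V frontier next custo c = .inr (V', next', custo') →
        bfsLoop graph V (frontier.map (fun u => (c, u)) ++ next.map (fun v => (c + 1, v))) custo
          = bfsLoop graph V' (next'.map (fun v => (c + 1, v))) custo') := by
  induction frontier with
  | nil =>
    intro V next custo
    constructor
    · intro ans h
      simp [lvStep] at h
    · intro V' next' custo' h
      simp only [lvStep, Sum.inr.injEq, Prod.mk.injEq] at h
      obtain ⟨h1, h2, h3⟩ := h
      subst h1; subst h2; subst h3
      simp
  | cons u rest ih =>
    intro V next custo
    by_cases hc : PySem.Set.contains V u = true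
    · have hm : u ∈ V := (PySem.Set.contains_iff V u).mp hc
      have hstep : ∀ nx cu, lvStep graph V (u :: rest) nx cu c = lvStep graph V rest nx cu c := by
        intro nx cu
        rw [lvStep.eq_def]
        simp [hm]
      have hloop : bfsLoop graph V ((u :: rest).map (fun u => (c, u)) ++ next.map (fun v => (c + 1, v))) custo
          = bfsLoop graph V (rest.map (fun u => (c, u)) ++ next.map (fun v => (c + 1, v))) custo := by
        rw [List.map_cons, List.cons_append, bfsLoop]
        simp [hm]
      rw [hstep, hloop]
      exact ih V next custo
    · have hnc : u ∉ V := fun hm => hc ((PySem.Set.contains_iff V u).mpr hm)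
      have hloop1 : bfsLoop graph V ((u :: rest).map (fun u => (c, u)) ++ next.map (fun v => (c + 1, v))) custo
          = (match (PySem.Dict.mk graph).get? u with
             | none => (PySem.Set.add V u, 0)
             | some adj =>
               bfsLoop graph (PySem.Set.add V u)
                 ((rest.map (fun u => (c, u)) ++ next.map (fun v => (c + 1, v)))
                   ++ (adj.filter (fun v => !PySem.Set.contains (PySem.Set.add V u) v)).map
                     (fun v => (c + 1, v)))
                 (if adj.length = 0 then custo ++ [c] else custo)) := by
        rw [List.map_cons, List.cons_append, bfsLoop]
        simp [hnc]
        cases hget : (PySem.Dict.mk graph).get? u <;> simp only [hget]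
      cases hadj : (PySem.Dict.mk graph).get? u with
      | none =>
        have hstep : lvStep graph V (u :: rest) next custo c = .inl (PySem.Set.add V u, 0) := by
          rw [lvStep.eq_def]; simp [hnc, hadj]
        constructor
        · intro ans h
          rw [hstep] at h
          cases h
          rw [hloop1, hadj]
        · intro V' next' custo' h
          rw [hstep] at h
          cases h
      | some adj =>
        by_cases hlen : adj.length = 0
        · have hadjnil : adj = [] := List.eq_nil_of_length_eq_zero hlen
          subst hadjnil
          have hstep : lvStep graph V (u :: rest) next custo c
              = lvStep graph (PySem.Set.add V u) rest next (custo ++ [c]) c := by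
            rw [lvStep.eq_def]; simp [hnc, hadj]
          have hloop2 : bfsLoop graph V ((u :: rest).map (fun u => (c, u)) ++ next.map (fun v => (c + 1, v))) custo
              = bfsLoop graph (PySem.Set.add V u)
                  (rest.map (fun u => (c, u)) ++ next.map (fun v => (c + 1, v))) (custo ++ [c]) := by
            rw [hloop1, hadj]
            simp
          rw [hstep, hloop2]
          exact ih (PySem.Set.add V u) next (custo ++ [c])
        · have hstep : lvStep graph V (u :: rest) next custo c
              = lvStep graph (PySem.Set.add V u) rest
                  (next ++ adj.filter (fun v => !PySem.Set.contains (PySem.Set.add V u) v)) custo c := by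
            rw [lvStep.eq_def]; simp [hnc, hadj, hlen]
          have hloop2 : bfsLoop graph V ((u :: rest).map (fun u => (c, u)) ++ next.map (fun v => (c + 1, v))) custo
              = bfsLoop graph (PySem.Set.add V u)
                  (rest.map (fun u => (c, u))
                    ++ (next ++ adj.filter (fun v => !PySem.Set.contains (PySem.Set.add V u) v)).map
                      (fun v => (c + 1, v))) custo := by
            rw [hloop1, hadj]
            simp [hlen, List.append_assoc]
          rw [hstep, hloop2]
          exact ih (PySem.Set.add V u) _ custo

-- A's deque loop equals the level loop
theorem loop_eq (graph : List (Int × List Int)) :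
    ∀ V frontier custo c,
      bfsLoop graph V (frontier.map (fun u => (c, u))) custo = lvLoop graph V frontier custo c := by
  intro V frontier custo c
  induction V, frontier, custo, c using lvLoop.induct graph with
  | case1 V custo c m hm =>
    rw [lvLoop]
    simp only [List.map_nil]
    rw [bfsLoop]
  | case2 V custo c hm =>
    rw [lvLoop]
    simp only [List.map_nil]
    rw [bfsLoop]
  | case3 V custo c u rest ans hs =>
    rw [lvLoop]
    split
    · rename_i ans' heq
      have h1 := (level_eq graph c (u :: rest) V [] custo).1 ans' heq
      simpa using h1
    · rename_i V'' n'' c'' heq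
      rw [hs] at heq
      cases heq
  | case4 V custo c u rest V' next' custo' hs ih =>
    have heqL := (level_eq graph c (u :: rest) V [] custo).2 V' next' custo' hs
    rw [lvLoop]
    split
    · rename_i ans' heq
      rw [hs] at heq
      cases heq
    · rename_i V'' n'' c'' heq
      rw [hs] at heq
      cases heq
      rw [← ih]
      simpa using heqL


-- dict toolbox: the pair a key maps to is in items
theorem getD_pair_mem (d : PySem.Dict Int Int) (hnd : d.keys.Nodup) {u : Int}
    (hu : u ∈ d.keys) : (u, d.getD u 0) ∈ d.items := by
  have hk : d.keys = d.items.map Prod.fst := rfl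
  rw [hk] at hu
  obtain ⟨p, hp, hfst⟩ := List.mem_map.mp hu
  have : d.getD u 0 = p.2 := by
    have := PySem.Dict.getD_of_mem_items d (k := u) (v := p.2) (by rw [← hfst]; exact hp) hnd 0
    exact this
  rw [this, ← hfst]
  exact hp

theorem relaxAdj_noop : ∀ (adj : List Int) (d : PySem.Dict Int Int) (du : Int),
    (∀ v ∈ adj, v ∈ d.keys ∧ d.getD v 0 ≤ du + 1) → relaxAdj d du adj = d := by
  intro adj
  induction adj with
  | nil => intro d du _; rfl
  | cons v adj ih =>
    intro d du h
    obtain ⟨hv, hval⟩ := h v (by simp)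
    have hc : d.contains v = true := by
      rw [PySem.Dict.contains_eq_decide_mem_keys]; exact decide_eq_true hv
    have hlt : decide (du + 1 < d.getD v 0) = false := by
      simp only [decide_eq_false_iff_not, not_lt]; exact hval
    show relaxAdj (if !d.contains v || decide (du + 1 < d.getD v 0) then d.insert v (du + 1) else d) du adj = d
    rw [hc, hlt]
    simp only [Bool.not_true, Bool.or_self, Bool.false_or, if_neg (by simp : ¬(false = true))]
    exact ih d du (fun w hw => h w (by simp [hw]))

theorem relaxAdj_items : ∀ (adj : List Int) (d : PySem.Dict Int Int) (du : Int),
    d.keys.Nodup → (∀ p ∈ d.items, p.2 ≤ du + 1) →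
    (relaxAdj d du adj).items = d.items ++ (pvFresh d.keys adj).map (fun v => (v, du + 1)) := by
  intro adj
  induction adj with
  | nil => intro d du _ _; simp [relaxAdj, pvFresh]
  | cons v adj ih =>
    intro d du hnd hval
    by_cases hv : v ∈ d.keys
    · have hc : d.contains v = true := by
        rw [PySem.Dict.contains_eq_decide_mem_keys]; exact decide_eq_true hv
      have hle : d.getD v 0 ≤ du + 1 := by
        have hmem := getD_pair_mem d hnd hv
        exact hval _ hmem
      have hlt : decide (du + 1 < d.getD v 0) = false := by
        simp only [decide_eq_false_iff_not, not_lt]; exact hle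
      show (relaxAdj (if !d.contains v || decide (du + 1 < d.getD v 0) then d.insert v (du + 1) else d) du adj).items = _
      rw [hc, hlt]
      simp only [Bool.not_true, Bool.or_self, Bool.false_or, if_neg (by simp : ¬(false = true))]
      rw [ih d du hnd hval]
      have : pvFresh d.keys (v :: adj) = pvFresh d.keys adj := by
        simp [pvFresh, hv]
      rw [this]
    · have hc : d.contains v = false := by
        rw [PySem.Dict.contains_eq_decide_mem_keys]; exact decide_eq_false hv
      show (relaxAdj (if !d.contains v || decide (du + 1 < d.getD v 0) then d.insert v (du + 1) else d) du adj).items = _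
      rw [hc]
      simp only [Bool.not_false, Bool.true_or, if_true]
      have hitems : (d.insert v (du + 1)).items = d.items ++ [(v, du + 1)] :=
        PySem.Dict.items_insert_of_not_contains d _ hc
      have hkeys : (d.insert v (du + 1)).keys = d.keys ++ [v] := by
        show (d.insert v (du + 1)).items.map Prod.fst = _
        rw [hitems, List.map_append]
        rfl
      have hnd' : (d.insert v (du + 1)).keys.Nodup := PySem.Dict.nodup_keys_insert d _ _ hnd
      have hval' : ∀ p ∈ (d.insert v (du + 1)).items, p.2 ≤ du + 1 := by
        intro p hp
        rw [hitems] at hp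
        rcases List.mem_append.mp hp with h | h
        · exact hval p h
        · simp at h; rw [h]
      rw [ih _ du hnd' hval', hitems, hkeys]
      have : pvFresh d.keys (v :: adj) = v :: pvFresh (d.keys ++ [v]) adj := by
        simp [pvFresh, hv]
      rw [this]
      simp [List.append_assoc]

theorem relaxKeys_sub_noop (graph : List (Int × List Int)) : ∀ (l : List Int) (d : PySem.Dict Int Int),
    (∀ u ∈ l, ∃ adj, (PySem.Dict.mk graph).get? u = some adj ∧
      (∀ v ∈ adj, v ∈ d.keys ∧ d.getD v 0 ≤ d.getD u 0 + 1)) →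
    ∀ rest, relaxKeys graph (l ++ rest) d = relaxKeys graph rest d := by
  intro l
  induction l with
  | nil => intro d _ rest; rfl
  | cons u l ih =>
    intro d h rest
    obtain ⟨adj, hadj, hst⟩ := h u (by simp)
    show (match (PySem.Dict.mk graph).get? u with
      | none => none
      | some adj => relaxKeys graph (l ++ rest) (relaxAdj d (d.getD u 0) adj)) = relaxKeys graph rest d
    rw [hadj]
    show relaxKeys graph (l ++ rest) (relaxAdj d (d.getD u 0) adj) = relaxKeys graph rest d
    rw [relaxAdj_noop adj d _ hst]
    exact ih d (fun w hw => h w (by simp [hw])) rest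

def pvStable (graph : List (Int × List Int)) (d : PySem.Dict Int Int) : Prop :=
  ∀ u ∈ d.keys, ∃ adj, (PySem.Dict.mk graph).get? u = some adj ∧
    (∀ v ∈ adj, v ∈ d.keys ∧ d.getD v 0 ≤ d.getD u 0 + 1)

theorem relaxRounds_stable (graph : List (Int × List Int)) (d : PySem.Dict Int Int)
    (h : pvStable graph d) : ∀ n, relaxRounds graph n d = some d := by
  intro n
  induction n with
  | zero => rfl
  | succ n ih =>
    show (match relaxKeys graph d.keys d with
      | none => none
      | some d' => relaxRounds graph n d') = some d
    have : relaxKeys graph d.keys d = some d := by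
      have := relaxKeys_sub_noop graph d.keys d h []
      simpa using this
    rw [this]
    exact ih

theorem leafCosts_eq (graph : List (Int × List Int)) : ∀ (items : List (Int × Int)),
    (∀ p ∈ items, ∃ a, (PySem.Dict.mk graph).get? p.1 = some a) →
    leafCosts graph items
      = some ((items.filter (fun p => decide ((PySem.Dict.mk graph).get? p.1 = some []))).map Prod.snd) := by
  intro items
  induction items with
  | nil => intro _; rfl
  | cons p items ih =>
    intro h
    obtain ⟨a, ha⟩ := h p (by simp)
    obtain ⟨u, du⟩ := p
    show (match (PySem.Dict.mk graph).get? u with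
      | none => none
      | some adj => match leafCosts graph items with
        | none => none
        | some cs => some (if adj.length = 0 then du :: cs else cs)) = _
    rw [ha, ih (fun q hq => h q (by simp [hq]))]
    by_cases hnil : a = []
    · subst hnil
      simp [List.filter_cons, ha]
    · have : decide ((PySem.Dict.mk graph).get? (u, du).1 = some []) = false := by
        simp only [decide_eq_false_iff_not, ha]
        intro hcon
        exact hnil (by injection hcon)
      simp only [List.filter_cons, this]
      have hlen : a.length ≠ 0 := fun h0 => hnil (List.eq_nil_of_length_eq_zero h0)
      simp [hlen]


theorem map_fst_pair (l : List Int) (c : Int) :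
    (l.map (fun v => (v, c))).map Prod.fst = l := by
  simp [Function.comp_def]

@[simp] theorem pvFresh_nil (V : List Int) : pvFresh V [] = [] := rfl

-- one relaxation round over the fresh part of the snapshot mirrors one BFS level
theorem step_eq (graph : List (Int × List Int))
    (hRkey : ∀ u ∈ pvReach graph (graph.length + 1), (PySem.Dict.mk graph).contains u = true)
    (depth : Int) :
    ∀ (fr V nx custo : List Int) (e : PySem.Dict Int Int) (WI : List (Int × Int)) (news : List Int),
    e.items = WI ++ (pvFresh V fr).map (fun u => (u, depth)) ++ news.map (fun v => (v, depth + 1)) →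
    WI.map Prod.fst = V →
    (∀ p ∈ WI, p.2 ≤ depth) →
    (∀ p ∈ WI, ∀ a, (PySem.Dict.mk graph).get? p.1 = some a →
      ∀ v ∈ a, v ∈ e.keys ∧ e.getD v 0 ≤ p.2 + 1) →
    news = pvFresh (V ++ pvFresh V fr) nx →
    custo = (WI.filter (fun p => decide ((PySem.Dict.mk graph).get? p.1 = some []))).map Prod.snd →
    (∀ u ∈ fr, u ∈ pvReach graph (graph.length + 1)) →
    (∀ u ∈ e.keys, u ∈ pvReach graph (graph.length + 1)) →
    (∀ u ∈ nx, u ∈ pvReach graph (graph.length + 1)) →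
    e.keys.Nodup →
    ∃ e' WI' nx' custo',
      relaxKeys graph (pvFresh V fr) e = some e' ∧
      lvStep graph V fr nx custo depth = .inr (V ++ pvFresh V fr, nx', custo') ∧
      e'.items = WI' ++ (pvFresh (V ++ pvFresh V fr) nx').map (fun v => (v, depth + 1)) ∧
      WI'.map Prod.fst = V ++ pvFresh V fr ∧
      (∀ p ∈ WI', p.2 ≤ depth) ∧
      (∀ p ∈ WI', ∀ a, (PySem.Dict.mk graph).get? p.1 = some a →
        ∀ v ∈ a, v ∈ e'.keys ∧ e'.getD v 0 ≤ p.2 + 1) ∧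
      custo' = (WI'.filter (fun p => decide ((PySem.Dict.mk graph).get? p.1 = some []))).map Prod.snd ∧
      (∀ u ∈ e'.keys, u ∈ pvReach graph (graph.length + 1)) ∧
      (∀ u ∈ nx', u ∈ pvReach graph (graph.length + 1)) ∧
      e'.keys.Nodup := by
  intro fr
  induction fr with
  | nil =>
    intro V nx custo e WI news h1 h2 h3 h4 h5 h6 h7 h8 h9 h10
    refine ⟨e, WI, nx, custo, rfl, by simp [lvStep], ?_, by simpa using h2, h3, h4, h6, h8, h9, h10⟩
    rw [h1, h5]
    simp
  | cons u fr ih =>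
    intro V nx custo e WI news h1 h2 h3 h4 h5 h6 h7 h8 h9 h10
    by_cases hu : u ∈ V
    · have hfr : pvFresh V (u :: fr) = pvFresh V fr := by simp [pvFresh, hu]
      rw [hfr] at h1 h5 ⊢
      have hcV : PySem.Set.contains V u = true := (PySem.Set.contains_iff V u).mpr hu
      have hstep : lvStep graph V (u :: fr) nx custo depth = lvStep graph V fr nx custo depth := by
        rw [lvStep.eq_def]; simp [hu]
      rw [hstep]
      exact ih V nx custo e WI news h1 h2 h3 h4 h5 h6 (fun w hw => h7 w (by simp [hw])) h8 h9 h10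
    · have hcV : PySem.Set.contains V u = false := by
        by_contra h
        exact hu ((PySem.Set.contains_iff V u).mp (by revert h; cases PySem.Set.contains V u <;> simp))
      have hVadd : PySem.Set.add V u = V ++ [u] := PySem.Set.add_of_not_mem hu
      have huR : u ∈ pvReach graph (graph.length + 1) := h7 u (by simp)
      have hadj : ∃ adj, (PySem.Dict.mk graph).get? u = some adj := by
        have := hRkey u huR
        rw [PySem.Dict.contains_eq_isSome_get?] at this
        exact Option.isSome_iff_exists.mp this
      obtain ⟨adj, hadj⟩ := hadj
      have hfr : pvFresh V (u :: fr) = u :: pvFresh (V ++ [u]) fr := by simp [pvFresh, hu]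
      have hdu : e.getD u 0 = depth := by
        refine PySem.Dict.getD_of_mem_items e ?_ h10 0
        rw [h1, hfr]
        simp
      -- value bound on all current items
      have hval_items : ∀ p ∈ e.items, p.2 ≤ depth + 1 := by
        intro p hp
        rw [h1] at hp
        rcases List.mem_append.mp hp with hp | hp
        · rcases List.mem_append.mp hp with hp | hp
          · have := h3 p hp; omega
          · obtain ⟨w, _, rfl⟩ := List.mem_map.mp hp; omega
        · obtain ⟨w, _, rfl⟩ := List.mem_map.mp hp; omega
      have keysE : e.keys = (V ++ pvFresh V (u :: fr)) ++ news := by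
        show e.items.map Prod.fst = _
        rw [h1]
        simp [Function.comp_def, h2]
      set e1 := relaxAdj e depth adj with he1def
      set newAdd := pvFresh e.keys adj with hnewAdd
      have hE1 : e1.items = e.items ++ newAdd.map (fun v => (v, depth + 1)) :=
        relaxAdj_items adj e depth h10 hval_items
      have keysE1 : e1.keys = e.keys ++ newAdd := by
        show e1.items.map Prod.fst = _
        rw [hE1, List.map_append, map_fst_pair]
        rfl
      have hnd1 : e1.keys.Nodup := by
        rw [keysE1]
        refine List.Nodup.append h10 (pvFresh_nodup adj e.keys) ?_
        intro x hx hx'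
        exact (mem_pvFresh.mp hx').2 hx
      have hgetD1_old : ∀ v ∈ e.keys, e1.getD v 0 = e.getD v 0 := by
        intro v hv
        refine PySem.Dict.getD_of_mem_items e1 ?_ hnd1 0
        rw [hE1]
        exact List.mem_append_left _ (getD_pair_mem e h10 hv)
      have hval1 : ∀ v ∈ e1.keys, e1.getD v 0 ≤ depth + 1 := by
        intro v hv
        have hpair := getD_pair_mem e1 hnd1 hv
        rw [hE1] at hpair
        rcases List.mem_append.mp hpair with hp | hp
        · exact hval_items _ hp
        · obtain ⟨w, _, hw⟩ := List.mem_map.mp hp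
          have h2' := congrArg Prod.snd hw
          simp at h2'
          omega
      have hadjR : ∀ v ∈ adj, v ∈ pvReach graph (graph.length + 1) := by
        intro v hv
        refine pvReach_closed graph u huR v ?_
        simp [pvAdj, PySem.Dict.getD_eq_get?_getD, hadj, hv]
      have hrelaxhead : relaxKeys graph (pvFresh V (u :: fr)) e
          = relaxKeys graph (pvFresh (V ++ [u]) fr) e1 := by
        rw [hfr]
        show (match (PySem.Dict.mk graph).get? u with
          | none => none
          | some adj => relaxKeys graph (pvFresh (V ++ [u]) fr) (relaxAdj e (e.getD u 0) adj)) = _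
        rw [hadj, hdu]
      by_cases hnil : adj = []
      · subst hnil
        have hE1e : e1 = e := rfl
        have hstep : lvStep graph V (u :: fr) nx custo depth
            = lvStep graph (V ++ [u]) fr nx (custo ++ [depth]) depth := by
          rw [lvStep.eq_def]
          simp [hu, hadj, hVadd]
        have h1' : e.items = (WI ++ [(u, depth)]) ++ (pvFresh (V ++ [u]) fr).map (fun w => (w, depth))
            ++ news.map (fun v => (v, depth + 1)) := by
          rw [h1, hfr]
          simp
        have h4' : ∀ p ∈ WI ++ [(u, depth)], ∀ a, (PySem.Dict.mk graph).get? p.1 = some a →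
            ∀ v ∈ a, v ∈ e.keys ∧ e.getD v 0 ≤ p.2 + 1 := by
          intro p hp a ha v hv
          rcases List.mem_append.mp hp with hp | hp
          · exact h4 p hp a ha v hv
          · simp only [List.mem_singleton] at hp
            subst hp
            rw [hadj] at ha
            cases ha
            simp at hv
        have h5' : news = pvFresh ((V ++ [u]) ++ pvFresh (V ++ [u]) fr) nx := by
          rw [h5, hfr]
          simp
        have h6' : custo ++ [depth] = ((WI ++ [(u, depth)]).filter
            (fun p => decide ((PySem.Dict.mk graph).get? p.1 = some []))).map Prod.snd := by
          rw [h6, List.filter_append]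
          simp [hadj]
        have h3' : ∀ p ∈ WI ++ [(u, depth)], p.2 ≤ depth := by
          intro p hp
          rcases List.mem_append.mp hp with hp | hp
          · exact h3 p hp
          · simp at hp; simp [hp]
        obtain ⟨e', WI', nx', custo', ihr, ihs, ihh1, ihh2, ihh3, ihh4, ihh6, ihh8, ihh9, ihh10⟩ :=
          ih (V ++ [u]) nx (custo ++ [depth]) e (WI ++ [(u, depth)]) news h1'
            (by simp [h2]) h3' h4' h5' h6' (fun w hw => h7 w (by simp [hw])) h8 h9 h10
        refine ⟨e', WI', nx', custo', ?_, ?_, ?_, ?_, ihh3, ihh4, ihh6, ihh8, ihh9, ihh10⟩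
        · rw [hrelaxhead]
          exact ihr
        · rw [hstep, ihs, hfr]
          simp
        · rw [ihh1, hfr]
          simp
        · rw [ihh2, hfr]
          simp
      · have hlen : adj.length ≠ 0 := fun h0 => hnil (List.eq_nil_of_length_eq_zero h0)
        set adjF := adj.filter (fun v => !PySem.Set.contains (PySem.Set.add V u) v) with hadjF
        have hstep : lvStep graph V (u :: fr) nx custo depth
            = lvStep graph (V ++ [u]) fr (nx ++ adjF) custo depth := by
          rw [lvStep.eq_def]
          simp [hu, hadj, hnil, hVadd, hadjF]
        have hBsub : ∀ x ∈ PySem.Set.add V u, x ∈ (V ++ pvFresh V (u :: fr)) ++ news := by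
          intro x hx
          rw [hVadd] at hx
          rcases List.mem_append.mp hx with hx | hx
          · exact List.mem_append_left _ (List.mem_append_left _ hx)
          · simp only [List.mem_singleton] at hx
            subst hx
            refine List.mem_append_left _ (List.mem_append_right _ ?_)
            rw [hfr]; simp
        have hnewAddF : newAdd = pvFresh ((V ++ pvFresh V (u :: fr)) ++ news) adjF := by
          rw [hnewAdd, keysE, hadjF]
          exact (pvFresh_filter (PySem.Set.add V u) adj _ hBsub).symm
        have hnews' : news ++ newAdd = pvFresh ((V ++ [u]) ++ pvFresh (V ++ [u]) fr) (nx ++ adjF) := by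
          have hB : (V ++ [u]) ++ pvFresh (V ++ [u]) fr = V ++ pvFresh V (u :: fr) := by
            rw [hfr]; simp
          rw [hB, pvFresh_append, ← h5, hnewAddF]
        have h1' : e1.items = (WI ++ [(u, depth)]) ++ (pvFresh (V ++ [u]) fr).map (fun w => (w, depth))
            ++ (news ++ newAdd).map (fun v => (v, depth + 1)) := by
          rw [hE1, h1, hfr]
          simp
        have h4' : ∀ p ∈ WI ++ [(u, depth)], ∀ a, (PySem.Dict.mk graph).get? p.1 = some a →
            ∀ v ∈ a, v ∈ e1.keys ∧ e1.getD v 0 ≤ p.2 + 1 := by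
          intro p hp a ha v hv
          rcases List.mem_append.mp hp with hp | hp
          · obtain ⟨hv1, hv2⟩ := h4 p hp a ha v hv
            refine ⟨by rw [keysE1]; exact List.mem_append_left _ hv1, ?_⟩
            rw [hgetD1_old v hv1]
            exact hv2
          · simp only [List.mem_singleton] at hp
            subst hp
            rw [hadj] at ha
            cases ha
            have hv1 : v ∈ e1.keys := by
              rw [keysE1]
              by_cases hvk : v ∈ e.keys
              · exact List.mem_append_left _ hvk
              · exact List.mem_append_right _ (mem_pvFresh.mpr ⟨hv, hvk⟩)
            exact ⟨hv1, by simpa using hval1 v hv1⟩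
        have h6' : custo = ((WI ++ [(u, depth)]).filter
            (fun p => decide ((PySem.Dict.mk graph).get? p.1 = some []))).map Prod.snd := by
          rw [h6, List.filter_append]
          have : decide ((PySem.Dict.mk graph).get? u = some []) = false := by
            simp only [decide_eq_false_iff_not, hadj]
            intro hcon
            exact hnil (by injection hcon)
          simp [this]
        have h8' : ∀ w ∈ e1.keys, w ∈ pvReach graph (graph.length + 1) := by
          intro w hw
          rw [keysE1] at hw
          rcases List.mem_append.mp hw with hw | hw
          · exact h8 w hw
          · exact hadjR w (mem_pvFresh.mp hw).1
        have h9' : ∀ w ∈ nx ++ adjF, w ∈ pvReach graph (graph.length + 1) := by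
          intro w hw
          rcases List.mem_append.mp hw with hw | hw
          · exact h9 w hw
          · exact hadjR w (List.mem_of_mem_filter hw)
        have h3' : ∀ p ∈ WI ++ [(u, depth)], p.2 ≤ depth := by
          intro p hp
          rcases List.mem_append.mp hp with hp | hp
          · exact h3 p hp
          · simp at hp; simp [hp]
        obtain ⟨e', WI', nx', custo', ihr, ihs, ihh1, ihh2, ihh3, ihh4, ihh6, ihh8, ihh9, ihh10⟩ :=
          ih (V ++ [u]) (nx ++ adjF) custo e1 (WI ++ [(u, depth)]) (news ++ newAdd) h1'
            (by simp [h2]) h3' h4' hnews' h6' (fun w hw => h7 w (by simp [hw])) h8' h9' hnd1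
        refine ⟨e', WI', nx', custo', ?_, ?_, ?_, ?_, ihh3, ihh4, ihh6, ihh8, ihh9, ihh10⟩
        · rw [hrelaxhead]
          exact ihr
        · rw [hstep, ihs, hfr]
          simp
        · rw [ihh1, hfr]
          simp
        · rw [ihh2, hfr]
          simp


theorem lvLoop_cons (graph : List (Int × List Int)) (V : PySem.Set Int) (u : Int)
    (rest custo : List Int) (depth : Int) (V' : PySem.Set Int) (next custo' : List Int)
    (hs : lvStep graph V (u :: rest) [] custo depth = .inr (V', next, custo')) :
    lvLoop graph V (u :: rest) custo depth = lvLoop graph V' next custo' (depth + 1) := by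
  rw [lvLoop]
  split
  · rename_i ans heq
    rw [hs] at heq
    cases heq
  · rename_i V'' n'' c'' heq
    rw [hs] at heq
    cases heq
    rfl

-- the whole computation: len(graph) relaxation rounds compute exactly A's levels
theorem main_eq (graph : List (Int × List Int))
    (hRkey : ∀ u ∈ pvReach graph (graph.length + 1), (PySem.Dict.mk graph).contains u = true) :
    ∀ (V fr custo : List Int) (depth : Int),
    ∀ (e : PySem.Dict Int Int) (WI : List (Int × Int)) (n : Nat),
    e.items = WI ++ (pvFresh V fr).map (fun u => (u, depth)) →
    WI.map Prod.fst = V →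
    (∀ p ∈ WI, p.2 ≤ depth) →
    (∀ p ∈ WI, ∀ a, (PySem.Dict.mk graph).get? p.1 = some a →
      ∀ v ∈ a, v ∈ e.keys ∧ e.getD v 0 ≤ p.2 + 1) →
    custo = (WI.filter (fun p => decide ((PySem.Dict.mk graph).get? p.1 = some []))).map Prod.snd →
    (∀ u ∈ fr, u ∈ pvReach graph (graph.length + 1)) →
    (∀ u ∈ e.keys, u ∈ pvReach graph (graph.length + 1)) →
    e.keys.Nodup →
    graph.length ≤ n + V.length →
    ∃ efin, relaxRounds graph n e = some efin ∧
      lvLoop graph V fr custo depth = postRelax graph efin := by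
  intro V fr custo depth
  induction V, fr, custo, depth using lvLoop.induct graph with
  | case1 V custo depth m hm =>
    intro e WI n h1 h2 h3 h4 h6 h7 h8 h10 hcard
    rw [pvFresh_nil, List.map_nil, List.append_nil] at h1
    have keysV : e.keys = V := by
      show e.items.map Prod.fst = V
      rw [h1, h2]
    have hsome : ∀ u ∈ e.keys, ∃ a, (PySem.Dict.mk graph).get? u = some a := by
      intro u hu
      have := hRkey u (h8 u hu)
      rw [PySem.Dict.contains_eq_isSome_get?] at this
      exact Option.isSome_iff_exists.mp this
    have hstable : pvStable graph e := by
      intro u hu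
      obtain ⟨a, ha⟩ := hsome u hu
      refine ⟨a, ha, ?_⟩
      have hpair := getD_pair_mem e h10 hu
      rw [h1] at hpair
      exact h4 _ hpair a ha
    have hleaf : leafCosts graph e.items = some custo := by
      rw [leafCosts_eq graph e.items
        (fun p hp => hsome p.1 (by show p.1 ∈ e.items.map Prod.fst; exact List.mem_map_of_mem hp)),
        h1, ← h6]
    refine ⟨e, relaxRounds_stable graph e hstable n, ?_⟩
    rw [lvLoop]
    simp only [hm]
    unfold postRelax
    rw [hleaf]
    simp only [hm, keysV]
  | case2 V custo depth hm =>
    intro e WI n h1 h2 h3 h4 h6 h7 h8 h10 hcard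
    rw [pvFresh_nil, List.map_nil, List.append_nil] at h1
    have keysV : e.keys = V := by
      show e.items.map Prod.fst = V
      rw [h1, h2]
    have hsome : ∀ u ∈ e.keys, ∃ a, (PySem.Dict.mk graph).get? u = some a := by
      intro u hu
      have := hRkey u (h8 u hu)
      rw [PySem.Dict.contains_eq_isSome_get?] at this
      exact Option.isSome_iff_exists.mp this
    have hstable : pvStable graph e := by
      intro u hu
      obtain ⟨a, ha⟩ := hsome u hu
      refine ⟨a, ha, ?_⟩
      have hpair := getD_pair_mem e h10 hu
      rw [h1] at hpair
      exact h4 _ hpair a ha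
    have hleaf : leafCosts graph e.items = some custo := by
      rw [leafCosts_eq graph e.items
        (fun p hp => hsome p.1 (by show p.1 ∈ e.items.map Prod.fst; exact List.mem_map_of_mem hp)),
        h1, ← h6]
    refine ⟨e, relaxRounds_stable graph e hstable n, ?_⟩
    rw [lvLoop]
    simp only [hm]
    unfold postRelax
    rw [hleaf]
    simp only [hm, keysV]
  | case3 V custo depth u rest ans hs =>
    intro e WI n h1 h2 h3 h4 h6 h7 h8 h10 hcard
    obtain ⟨e', WI', nx', custo'', hrelax, hlv, _⟩ :=
      step_eq graph hRkey depth (u :: rest) V [] custo e WI []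
        (by rw [h1]; simp) h2 h3 h4 (by simp) h6 h7 h8 (by simp) h10
    rw [hs] at hlv
    cases hlv
  | case4 V custo depth u rest V' next custo' hs ih =>
    intro e WI n h1 h2 h3 h4 h6 h7 h8 h10 hcard
    obtain ⟨e', WI', nx', custo'', hrelax, hlv, hh1, hh2, hh3, hh4, hh6, hh8, hh9, hh10⟩ :=
      step_eq graph hRkey depth (u :: rest) V [] custo e WI []
        (by rw [h1]; simp) h2 h3 h4 (by simp) h6 h7 h8 (by simp) h10
    rw [hs] at hlv
    injection hlv with hlv
    have hV' : V' = V ++ pvFresh V (u :: rest) := congrArg Prod.fst hlv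
    have hnx' : next = nx' := congrArg (fun p => p.2.1) hlv
    have hcusto' : custo' = custo'' := congrArg (fun p => p.2.2) hlv
    have hkeysE : e.keys = V ++ pvFresh V (u :: rest) := by
      show e.items.map Prod.fst = _
      rw [h1]
      simp [Function.comp_def, h2]
    by_cases hF : pvFresh V (u :: rest) = []
    · have he' : e = e' := by
        rw [hF] at hrelax
        exact Option.some.inj hrelax
      obtain ⟨efin, hrounds, hloop⟩ := ih e WI' n
        (by rw [hnx', hV', he', hh1])
        (by rw [hV']; exact hh2)
        (fun p hp => by have := hh3 p hp; omega)
        (by rw [he']; exact hh4)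
        (by rw [hcusto']; exact hh6)
        (by rw [hnx']; exact hh9)
        (by rw [he']; exact hh8)
        (by rw [he']; exact hh10)
        (by rw [hV', hF]; simpa using hcard)
      refine ⟨efin, hrounds, ?_⟩
      rw [lvLoop_cons graph V u rest custo depth V' next custo' hs]
      exact hloop
    · cases n with
      | zero =>
        exfalso
        obtain ⟨u0, hu0F⟩ := List.exists_mem_of_ne_nil _ hF
        obtain ⟨hu0fr, hu0V⟩ := mem_pvFresh.mp hu0F
        have hu0keys : u0 ∈ e.keys := by
          rw [hkeysE]; exact List.mem_append_right _ hu0F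
        have hu0G : u0 ∈ (PySem.Dict.mk graph).keys :=
          (PySem.Dict.contains_iff_mem_keys _ _).mp (hRkey u0 (h8 u0 hu0keys))
        have hVsub : V.toFinset ⊆ (PySem.Dict.mk graph).keys.toFinset := by
          intro x hx
          rw [List.mem_toFinset] at hx ⊢
          exact (PySem.Dict.contains_iff_mem_keys _ _).mp
            (hRkey x (h8 x (by rw [hkeysE]; exact List.mem_append_left _ hx)))
        have hVnd : V.Nodup := by
          rw [hkeysE] at h10
          exact h10.of_append_left
        have hVcard : V.toFinset.card = V.length := List.toFinset_card_of_nodup hVnd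
        have hklen : (PySem.Dict.mk graph).keys.length = graph.length := by
          simp [PySem.Dict.keys_mk]
        have hkcard : (PySem.Dict.mk graph).keys.toFinset.card ≤ graph.length :=
          le_trans ((PySem.Dict.mk graph).keys.toFinset_card_le) (le_of_eq hklen)
        have hVlen : graph.length ≤ V.length := by simpa using hcard
        have heq : V.toFinset = (PySem.Dict.mk graph).keys.toFinset :=
          Finset.eq_of_subset_of_card_le hVsub (by omega)
        have : u0 ∈ V := by
          rw [← List.mem_toFinset, heq, List.mem_toFinset]
          exact hu0G
        exact hu0V this
      | succ m =>
        have hstabV : ∀ x ∈ V, ∃ adj, (PySem.Dict.mk graph).get? x = some adj ∧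
            (∀ v ∈ adj, v ∈ e.keys ∧ e.getD v 0 ≤ e.getD x 0 + 1) := by
          intro x hx
          have hxkeys : x ∈ e.keys := by rw [hkeysE]; exact List.mem_append_left _ hx
          have hsome := hRkey x (h8 x hxkeys)
          rw [PySem.Dict.contains_eq_isSome_get?] at hsome
          obtain ⟨a, ha⟩ := Option.isSome_iff_exists.mp hsome
          refine ⟨a, ha, ?_⟩
          have hpair := getD_pair_mem e h10 hxkeys
          rw [h1] at hpair
          rcases List.mem_append.mp hpair with hp | hp
          · exact h4 _ hp a ha
          · exfalso
            obtain ⟨w, hw, hww⟩ := List.mem_map.mp hp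
            have : w = x := congrArg Prod.fst hww
            subst this
            exact (mem_pvFresh.mp hw).2 hx
        have hrounds1 : relaxRounds graph (m + 1) e = relaxRounds graph m e' := by
          show (match relaxKeys graph e.keys e with
            | none => none
            | some d' => relaxRounds graph m d') = _
          have hnoop : relaxKeys graph e.keys e = relaxKeys graph (pvFresh V (u :: rest)) e := by
            rw [hkeysE]
            exact relaxKeys_sub_noop graph V e hstabV (pvFresh V (u :: rest))
          rw [hnoop, hrelax]
        have hFlen : 1 ≤ (pvFresh V (u :: rest)).length := by
          cases hpf : pvFresh V (u :: rest) with
          | nil => exact absurd hpf hF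
          | cons a l => simp
        obtain ⟨efin, hrounds, hloop⟩ := ih e' WI' m
          (by rw [hnx', hV', hh1])
          (by rw [hV']; exact hh2)
          (fun p hp => by have := hh3 p hp; omega)
          hh4
          (by rw [hcusto']; exact hh6)
          (by rw [hnx']; exact hh9)
          hh8
          hh10
          (by rw [hV']; rw [List.length_append]; omega)
        refine ⟨efin, ?_, ?_⟩
        · rw [hrounds1]
          exact hrounds
        · rw [lvLoop_cons graph V u rest custo depth V' next custo' hs]
          exact hloop

-- ===== VERDICT (by name: the statement is the Claim_ definition above) =====
theorem bfs_spec : Claim_equal_bfs := by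
  intro graph _ hPre
  unfold Spec_bfs
  obtain ⟨hPre1, _⟩ := hPre
  have hA : bfs graph = lvLoop graph PySem.Set.empty [1] [] 1 := by
    unfold bfs
    have := loop_eq graph PySem.Set.empty [1] [] 1
    simpa using this
  obtain ⟨efin, hrounds, hloop⟩ := main_eq graph hPre1 PySem.Set.empty [1] [] 1
    (PySem.Dict.mk [(1, 1)]) [] graph.length
    (by simp [pvFresh])
    rfl
    (by simp)
    (by simp)
    rfl
    (by intro w hw; simp at hw; subst hw; exact one_mem_pvReach graph _)
    (by intro w hw
        have : w = 1 := by simpa [PySem.Dict.keys_mk] using hw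
        subst this
        exact one_mem_pvReach graph _)
    (by simp [PySem.Dict.keys_mk])
    (by omega)
  unfold bfs_alt
  rw [hrounds, hA, hloop]
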